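-- pv_equiv track=rewrite | github.com/311dada/SQL-TO-TEXT | Utils/metric.py | combine_same_ref
-- ===== SOURCE A (Python) =====
-- def combine_same_ref(preds_, refs_):
--     preds = []
--     refs = []
--
--     pre = ""
--
--     for index, pred in enumerate(preds_):
--         if pred == pre:
--             refs[-1].append(refs_[index])
--         else:
--             preds.append(pred)
--             pre = pred
--             refs.append([refs_[index]])
--
--     ref1 = []
--     ref2 = []
--
--     for ref in refs:
--         ref1.append(ref[0])
--         if len(ref) > 1:
--             ref2.append(ref[1])
--         else:
--             ref2.append(ref[0])
--
--     return preds, [ref1, ref2]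
-- ===== SOURCE B (Python) =====
-- def combine_same_ref(preds_, refs_):
--     preds = []
--     ref1 = []
--     ref2 = []
--     pre = ""
--     full = False
--     for pred, ref in zip(preds_, refs_):
--         if pred != pre:
--             preds.append(pred)
--             ref1.append(ref)
--             ref2.append(ref)
--             pre = pred
--             full = False
--         elif not full:
--             ref2[-1] = ref
--             full = True
--     return preds, [ref1, ref2]
-- ===== Notes on version B (the rewrite author's own statement) =====
-- stated objective: simpler
-- what changed: Replaces A's two passes (first build a list of per-group ref lists, then read element 0 and 1 of each group) by a single pass over zip(preds_, refs_) that keeps only the first two refs of the current group via a 'full' flag, dropping the intermediate list-of-lists.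
import Mathlib
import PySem

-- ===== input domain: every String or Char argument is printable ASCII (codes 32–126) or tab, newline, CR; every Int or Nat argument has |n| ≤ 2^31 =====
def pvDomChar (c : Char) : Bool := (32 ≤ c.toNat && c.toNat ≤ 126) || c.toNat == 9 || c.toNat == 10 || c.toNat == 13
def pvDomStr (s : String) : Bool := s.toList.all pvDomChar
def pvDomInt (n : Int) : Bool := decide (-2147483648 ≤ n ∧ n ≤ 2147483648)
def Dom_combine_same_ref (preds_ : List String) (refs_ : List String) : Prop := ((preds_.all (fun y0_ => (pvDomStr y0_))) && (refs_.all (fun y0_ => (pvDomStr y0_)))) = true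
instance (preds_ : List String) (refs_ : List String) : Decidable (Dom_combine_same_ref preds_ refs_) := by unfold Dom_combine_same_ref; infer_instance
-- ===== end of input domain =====

-- B replaces A's two passes (build a list of ref-groups, then read indices 0/1 of each group)
-- by a single pass keeping only the first two refs of the current group; return value only, A mutates nothing observable.

-- ===== PORT A =====
-- refs[-1].append(x): in-place append to the last group (reached only with refs ≠ [] under Pre_)
def pvAppendLast (xss : List (List String)) (x : String) : List (List String) :=
  xss.dropLast ++ [xss.getLastD [] ++ [x]]

-- one iteration of A's first loop; state = (preds, refs, pre), input = (index, pred)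
def pvStepA (refs_ : List String) (st : List String × List (List String) × String)
    (ip : Int × String) : List String × List (List String) × String :=
  if ip.2 == st.2.2 then
    (st.1, pvAppendLast st.2.1 ((PySem.List.pyGet? refs_ ip.1).getD ""), st.2.2)
  else
    (st.1 ++ [ip.2], st.2.1 ++ [[(PySem.List.pyGet? refs_ ip.1).getD ""]], ip.2)

-- one iteration of A's second loop; ref[0] / ref[1] (groups are nonempty when reached)
def pvStepRef (acc : List String × List String) (ref : List String) : List String × List String :=
  (acc.1 ++ [(PySem.List.pyGet? ref 0).getD ""],
   if 1 < ref.length then acc.2 ++ [(PySem.List.pyGet? ref 1).getD ""]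
   else acc.2 ++ [(PySem.List.pyGet? ref 0).getD ""])

def combine_same_ref (preds_ : List String) (refs_ : List String) :
    List String × List (List String) :=
  let st := (PySem.List.enumerate preds_).foldl (pvStepA refs_) ([], [], "")
  let rr := st.2.1.foldl pvStepRef ([], [])
  (st.1, [rr.1, rr.2])

-- ===== PORT B =====
-- one iteration of B's single loop; state = (preds, ref1, ref2, pre, full); ref2[-1] = ref is dropLast ++ [ref]
def pvStepB (st : List String × List String × List String × String × Bool)
    (pr : String × String) : List String × List String × List String × String × Bool :=
  if pr.1 != st.2.2.2.1 then
    (st.1 ++ [pr.1], st.2.1 ++ [pr.2], st.2.2.1 ++ [pr.2], pr.1, false)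
  else if !st.2.2.2.2 then
    (st.1, st.2.1, st.2.2.1.dropLast ++ [pr.2], st.2.2.2.1, true)
  else st

def combine_same_ref_alt (preds_ : List String) (refs_ : List String) :
    List String × List (List String) :=
  let st := (preds_.zip refs_).foldl pvStepB ([], [], [], "", false)
  (st.1, [st.2.1, st.2.2.1])

-- ===== PRECONDITION & SPEC =====
-- Pre_ excludes exactly the inputs where A raises: refs_ shorter than preds_ (refs_[index] IndexError)
-- or a first pred equal to the sentinel "" (refs[-1] on the empty refs, IndexError).
def Pre_combine_same_ref (preds_ : List String) (refs_ : List String) : Prop :=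
  preds_.length ≤ refs_.length ∧ preds_.head? ≠ some ""
instance (preds_ : List String) (refs_ : List String) : Decidable (Pre_combine_same_ref preds_ refs_) := by unfold Pre_combine_same_ref; infer_instance
def pvWitness_combine_same_ref : List String × List String := (["a", "a", "a", "b"], ["w", "x", "y", "z"])

def Spec_combine_same_ref (preds_ : List String) (refs_ : List String) (out : List String × List (List String)) : Prop := out = combine_same_ref_alt preds_ refs_
instance (preds_ : List String) (refs_ : List String) (out : List String × List (List String)) : Decidable (Spec_combine_same_ref preds_ refs_ out) := by unfold Spec_combine_same_ref; infer_instance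

-- ===== CLAIM (what is proved, stated in full; the proofs are below) =====
def Claim_equal_combine_same_ref : Prop := ∀ (preds_ : List String) (refs_ : List String), Dom_combine_same_ref preds_ refs_ → Pre_combine_same_ref preds_ refs_ → Spec_combine_same_ref preds_ refs_ (combine_same_ref preds_ refs_)

-- ===== LEMMAS AND PROOFS =====

-- first element of a group (= ref[0] with default) and "second, or first if absent" (= A's second loop per group)
def pvG0 (ref : List String) : String := (PySem.List.pyGet? ref 0).getD ""
def pvG1 (ref : List String) : String :=
  if 1 < ref.length then (PySem.List.pyGet? ref 1).getD "" else pvG0 ref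

theorem pvG0_cons (a : String) (t : List String) : pvG0 (a :: t) = a := by
  simp [pvG0]

theorem pvG1_singleton (a : String) : pvG1 [a] = a := by
  simp [pvG1, pvG0]

theorem pvG1_cons_cons (a b : String) (t : List String) : pvG1 (a :: b :: t) = b := by
  simp [pvG1, PySem.List.pyGet?, PySem.List.pyIdx?]

-- A's second loop computes the two maps
theorem pvSecondLoop (refs : List (List String)) : ∀ (a1 a2 : List String),
    refs.foldl pvStepRef (a1, a2) = (a1 ++ refs.map pvG0, a2 ++ refs.map pvG1) := by
  induction refs with
  | nil => intro a1 a2; simp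
  | cons r t ih =>
    intro a1 a2
    simp only [List.foldl_cons, List.map_cons]
    rw [ih]
    simp [pvStepRef, pvG0, pvG1]
    split_ifs <;> simp

-- the main loop invariant: A's state (preds, refs, pre) and B's state
-- (preds, refs.map pvG0, refs.map pvG1, pre, full) stay in step
theorem pvLoop (refs_all : List String) :
    ∀ (ps rs : List String) (k : Int) (preds : List String) (refs : List (List String))
      (pre : String) (full : Bool),
      refs ≠ [] →
      (if full then 2 ≤ (refs.getLastD []).length else (refs.getLastD []).length = 1) →
      ps.length ≤ rs.length →
      (∀ j : Nat, j < ps.length → PySem.List.pyGet? refs_all (k + (j : Int)) = rs[j]?) →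
      (let sA := (PySem.List.enumerate ps k).foldl (pvStepA refs_all) (preds, refs, pre)
       let sB := (ps.zip rs).foldl pvStepB (preds, refs.map pvG0, refs.map pvG1, pre, full)
       sA.1 = sB.1 ∧ sA.2.1.map pvG0 = sB.2.1 ∧ sA.2.1.map pvG1 = sB.2.2.1) := by
  intro ps
  induction ps with
  | nil => intro rs k preds refs pre full _ _ _ _; exact ⟨rfl, rfl, rfl⟩
  | cons p ps ih =>
    intro rs k preds refs pre full hne hfull hlen H
    cases rs with
    | nil => simp at hlen
    | cons r rs =>
      have hr : (PySem.List.pyGet? refs_all k).getD "" = r := by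
        have := H 0 (by simp)
        simp at this
        simp [this]
      have H' : ∀ j : Nat, j < ps.length → PySem.List.pyGet? refs_all ((k + 1) + (j : Int)) = rs[j]? := by
        intro j hj
        have := H (j + 1) (by simp; omega)
        have harith : k + ((j : Int) + 1) = (k + 1) + (j : Int) := by ring
        push_cast at this
        rw [harith] at this
        simpa using this
      rw [PySem.List.enumerate_cons]
      simp only [List.zip_cons_cons, List.foldl_cons]
      by_cases hpp : p = pre
      · -- pred == pre : A appends to refs[-1]; B updates ref2[-1] iff not full
        have hA : pvStepA refs_all (preds, refs, pre) (k, p) =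
            (preds, pvAppendLast refs r, pre) := by
          simp [pvStepA, hpp, hr]
        rw [hA]
        obtain ⟨init, l, hcat⟩ := (List.eq_nil_or_concat refs).resolve_left hne
        rw [List.concat_eq_append] at hcat
        subst hcat
        cases full with
        | false =>
          -- last group has exactly one element
          simp only [List.getLastD_concat, if_neg (by simp : ¬ (false = true))] at hfull
          obtain ⟨a, rfl⟩ : ∃ a, l = [a] := by
            cases l with
            | nil => simp at hfull
            | cons a t => cases t with
              | nil => exact ⟨a, rfl⟩
              | cons b t' => simp at hfull
          have hB : pvStepB (preds, (init ++ [[a]]).map pvG0, (init ++ [[a]]).map pvG1, pre, false) (p, r) =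
              (preds, (init ++ [[a]]).map pvG0,
               ((init ++ [[a]]).map pvG1).dropLast ++ [r], pre, true) := by
            simp [pvStepB, hpp]
          rw [hB]
          have hApp : pvAppendLast (init ++ [[a]]) r = init ++ [[a, r]] := by
            simp [pvAppendLast]
          rw [hApp]
          have hg0 : (init ++ [[a, r]]).map pvG0 = (init ++ [[a]]).map pvG0 := by
            simp [pvG0_cons]
          have hg1 : (init ++ [[a, r]]).map pvG1 =
              ((init ++ [[a]]).map pvG1).dropLast ++ [r] := by
            simp [pvG1_cons_cons, pvG1_singleton]
          rw [← hg0, ← hg1]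
          exact ih rs (k + 1) preds (init ++ [[a, r]]) pre true (by simp)
            (by simp) (by simpa using hlen) H'
        | true =>
          -- last group already has ≥ 2 elements; B does nothing
          simp only [List.getLastD_concat] at hfull
          obtain ⟨a, b, t, rfl⟩ : ∃ a b t, l = a :: b :: t := by
            cases l with
            | nil => simp at hfull
            | cons a t => cases t with
              | nil => simp at hfull
              | cons b t' => exact ⟨a, b, t', rfl⟩
          have hB : pvStepB (preds, (init ++ [a :: b :: t]).map pvG0, (init ++ [a :: b :: t]).map pvG1, pre, true) (p, r) =
              (preds, (init ++ [a :: b :: t]).map pvG0, (init ++ [a :: b :: t]).map pvG1, pre, true) := by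
            simp [pvStepB, hpp]
          rw [hB]
          have hApp : pvAppendLast (init ++ [a :: b :: t]) r = init ++ [a :: b :: (t ++ [r])] := by
            simp [pvAppendLast]
          rw [hApp]
          have hg0 : (init ++ [a :: b :: (t ++ [r])]).map pvG0 = (init ++ [a :: b :: t]).map pvG0 := by
            simp [pvG0_cons]
          have hg1 : (init ++ [a :: b :: (t ++ [r])]).map pvG1 = (init ++ [a :: b :: t]).map pvG1 := by
            simp [pvG1_cons_cons]
          rw [← hg0, ← hg1]
          exact ih rs (k + 1) preds (init ++ [a :: b :: (t ++ [r])]) pre true (by simp)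
            (by simp) (by simpa using hlen) H'
      · -- pred != pre : both open a fresh group
        have hA : pvStepA refs_all (preds, refs, pre) (k, p) =
            (preds ++ [p], refs ++ [[r]], p) := by
          simp [pvStepA, hpp, hr]
        have hB : pvStepB (preds, refs.map pvG0, refs.map pvG1, pre, full) (p, r) =
            (preds ++ [p], refs.map pvG0 ++ [r], refs.map pvG1 ++ [r], p, false) := by
          simp [pvStepB, hpp]
        rw [hA, hB]
        have hg0 : (refs ++ [[r]]).map pvG0 = refs.map pvG0 ++ [r] := by simp [pvG0_cons]
        have hg1 : (refs ++ [[r]]).map pvG1 = refs.map pvG1 ++ [r] := by simp [pvG1_singleton]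
        rw [← hg0, ← hg1]
        exact ih rs (k + 1) (preds ++ [p]) (refs ++ [[r]]) p false (by simp)
          (by simp) (by simpa using hlen) H'

-- ===== VERDICT (by name: the statement is the Claim_ definition above) =====
theorem combine_same_ref_spec : Claim_equal_combine_same_ref := by
  intro preds_ refs_ _ hpre
  obtain ⟨hlen, hhd⟩ := hpre
  unfold Spec_combine_same_ref
  cases preds_ with
  | nil => rfl
  | cons p ps =>
    cases refs_ with
    | nil => simp at hlen
    | cons r rs =>
      have hp : p ≠ "" := by simpa using hhd
      unfold combine_same_ref combine_same_ref_alt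
      rw [PySem.List.enumerate_cons]
      simp only [List.zip_cons_cons, List.foldl_cons]
      have hA : pvStepA (r :: rs) ([], [], "") (0, p) = ([p], [[r]], p) := by
        simp [pvStepA, hp]
      have hB : pvStepB ([], [], [], "", false) (p, r) =
          ([p], ([[r]] : List (List String)).map pvG0, ([[r]] : List (List String)).map pvG1, p, false) := by
        simp [pvStepB, hp, pvG0_cons, pvG1_singleton]
      rw [hA, hB]
      have := pvLoop (r :: rs) ps rs 1 [p] [[r]] p false (by simp)
        (by simp) (by simpa using hlen)
        (by intro j hj
            have : ((1 : Int) + (j : Int)) = ((j + 1 : Nat) : Int) := by push_cast; ring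
            rw [this, PySem.List.pyGet?_natCast]
            simp)
      obtain ⟨h1, h2, h3⟩ := this
      rw [pvSecondLoop]
      simp only [List.nil_append, zero_add]
      rw [h1, h2, h3]
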